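-- pv_equiv track=rewrite | github.com/l1ghtsource/ozon-ecup-matching | data_preprocessing.py | normalize
-- ===== SOURCE A (Python) =====
-- def normalize(text: str) -> str:
--     text = text.lower()
--     chars = []
--     for char in text:
--         if char.isalnum():
--             chars.append(char)
--         else:
--             chars.append(' ')
--     tokens = ''.join(chars).split()
--     return '_'.join(tokens)
-- ===== SOURCE B (Python) =====
-- def normalize(text: str) -> str:
--     # One pass over the lowered string, building maximal alnum runs directly
--     # (no space-padded intermediate string, no .split pass).
--     tokens = []
--     cur = []
--     for ch in text.lower():
--         if ch.isalnum():
--             cur.append(ch)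
--         elif cur:
--             tokens.append(''.join(cur))
--             cur = []
--     if cur:
--         tokens.append(''.join(cur))
--     return '_'.join(tokens)
-- ===== Notes on version B (the rewrite author's own statement) =====
-- stated objective: simpler
-- what changed: B groups maximal alphanumeric runs in a single pass with a current-token accumulator instead of A's three passes (build a space-padded character list, whitespace-split it, join).
import Mathlib
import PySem

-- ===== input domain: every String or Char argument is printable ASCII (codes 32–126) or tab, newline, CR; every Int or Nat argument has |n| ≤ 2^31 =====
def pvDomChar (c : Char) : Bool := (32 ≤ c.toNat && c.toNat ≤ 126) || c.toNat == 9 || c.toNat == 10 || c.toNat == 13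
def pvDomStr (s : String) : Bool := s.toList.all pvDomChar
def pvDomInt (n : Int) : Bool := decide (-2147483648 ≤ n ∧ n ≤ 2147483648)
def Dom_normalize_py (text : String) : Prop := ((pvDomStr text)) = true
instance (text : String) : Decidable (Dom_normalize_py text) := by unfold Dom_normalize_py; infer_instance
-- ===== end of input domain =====

-- B replaces A's pad-then-split-then-join pipeline with a single pass that
-- accumulates maximal alphanumeric runs directly (simpler decomposition).


-- ===== PORT A =====
def normalize_py (text : String) : String :=
  let lowered := PySem.Str.lower text
  let chars := lowered.toList.foldl
    (fun acc c => acc ++ [if PySem.Chars.isalnum c then c else ' ']) []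
  let tokens := PySem.Chars.split₀ chars
  String.ofList (PySem.Chars.join ['_'] tokens)

-- ===== PORT B =====
-- the single-pass loop of Source B: `tokens`/`cur` accumulators, final flush of `cur`
def normAltGo : List Char → List (List Char) → List Char → List (List Char)
  | [], tokens, cur => if cur.isEmpty then tokens else tokens ++ [cur]
  | c :: rest, tokens, cur =>
    if PySem.Chars.isalnum c then normAltGo rest tokens (cur ++ [c])
    else if cur.isEmpty then normAltGo rest tokens cur
    else normAltGo rest (tokens ++ [cur]) []

def normalize_py_alt (text : String) : String :=
  String.ofList (PySem.Chars.join ['_'] (normAltGo (PySem.Str.lower text).toList [] []))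

-- ===== PRECONDITION & SPEC =====
def Spec_normalize_py (text : String) (out : String) : Prop := out = normalize_py_alt text
instance (text : String) (out : String) : Decidable (Spec_normalize_py text out) := by unfold Spec_normalize_py; infer_instance

-- ===== CLAIM (what is proved, stated in full; the proofs are below) =====
def Claim_equal_normalize_py : Prop := ∀ (text : String), Dom_normalize_py text → Spec_normalize_py text (normalize_py text)

-- ===== LEMMAS AND PROOFS =====

-- a character accepted by Python's str.isalnum is never whitespace
theorem alnum_not_space (c : Char) (h : PySem.Chars.isalnum c = true) :
    PySem.Chars.isspace c = false := by
  simp only [PySem.Chars.isalnum, PySem.Chars.isalpha, PySem.Chars.isupper,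
    PySem.Chars.islower, PySem.Chars.isdigit, Char.le_def,
    UInt32.le_iff_toNat_le, Bool.or_eq_true, Bool.and_eq_true, decide_eq_true_eq] at h
  simp only [PySem.Chars.isspace, Bool.or_eq_false_iff, Bool.and_eq_false_iff,
    decide_eq_false_iff_not]
  have hl : ('A').val.toNat = 65 ∧ ('Z').val.toNat = 90 ∧ ('a').val.toNat = 97 ∧
      ('z').val.toNat = 122 ∧ ('0').val.toNat = 48 ∧ ('9').val.toNat = 57 := by decide
  obtain ⟨h1,h2,h3,h4,h5,h6⟩ := hl
  simp only [h1,h2,h3,h4,h5,h6] at h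
  simp only [Char.toNat] at *
  omega

-- A's append-loop builds exactly the padded map of the lowered string
theorem foldl_pad (cs : List Char) (acc : List Char) :
    cs.foldl (fun a c => a ++ [if PySem.Chars.isalnum c then c else ' ']) acc
      = acc ++ cs.map (fun c => if PySem.Chars.isalnum c then c else ' ') := by
  induction cs generalizing acc with
  | nil => simp
  | cons c rest ih => simp [List.foldl, ih]

-- whitespace-splitting the padded string is B's single-pass run grouping
theorem go_eq (cs : List Char) (tokens : List (List Char)) (cur : List Char) :
    PySem.Chars.split₀.go
      (cs.map (fun c => if PySem.Chars.isalnum c then c else ' '))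
      cur.reverse tokens.reverse
      = normAltGo cs tokens cur := by
  induction cs generalizing tokens cur with
  | nil =>
    simp only [List.map_nil, PySem.Chars.split₀.go, normAltGo]
    by_cases hc : cur = []
    · subst hc; simp
    · simp [hc]
  | cons c rest ih =>
    simp only [List.map_cons]
    by_cases h : PySem.Chars.isalnum c = true
    · rw [if_pos h]
      simp only [PySem.Chars.split₀.go, normAltGo, alnum_not_space c h,
        Bool.false_eq_true, if_false, h, if_true]
      have hr : c :: cur.reverse = (cur ++ [c]).reverse := by simp
      rw [hr, ih]
    · rw [if_neg h]
      simp only [PySem.Chars.split₀.go, normAltGo, h,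
        show PySem.Chars.isspace ' ' = true from by decide, if_true]
      by_cases hc : cur = []
      · subst hc; simpa using ih tokens []
      · rw [if_neg (by simp [hc] : ¬ cur.reverse.isEmpty = true),
          if_neg (by simp [hc] : ¬ cur.isEmpty = true)]
        have hr : cur.reverse.reverse :: tokens.reverse = (tokens ++ [cur]).reverse := by
          simp
        rw [hr, show ([] : List Char) = ([] : List Char).reverse from rfl, ih]
        simp

-- ===== VERDICT (by name: the statement is the Claim_ definition above) =====
theorem normalize_py_spec : Claim_equal_normalize_py := by
  intro text _
  unfold Spec_normalize_py normalize_py normalize_py_alt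
  simp only [PySem.Chars.split₀, foldl_pad, List.nil_append]
  rw [← go_eq (PySem.Str.lower text).toList [] []]
  simp
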